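-- pv_equiv track=rewrite | github.com/KisloTAooAnkit/Python-Programs | Contest/Beuty of arr.py | sumofBooty
-- ===== SOURCE A (Python) =====
-- def NSR(arr,twoRes):
--     stack = []
--     n = len(arr)
--     for i in range(0,n):
--         while(stack and arr[stack[-1]]>=arr[i]):
--             idx = stack.pop(-1)
--             twoRes[idx] = twoRes[idx] and False
--         stack.append(i)
--     return twoRes
--
-- def NGL(arr,twoRes):
--     stack = []
--     n = len(arr)
--     for i in range(n-1,-1,-1):
--         while(stack and arr[stack[-1]]<=arr[i]):
--             idx = stack.pop()
--             twoRes[idx] = twoRes[idx] and False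
--         stack.append(i)
--     return twoRes
--
-- def sumofBooty(arr):
--     n = len(arr)
--     twoRes = [True]*n
--     twoRes =NGL(arr,twoRes)
--     twoRes = NSR(arr,twoRes)
--     maxprofit = 0
--     for i in range(1,n-1):
--         if twoRes[i]:
--             maxprofit +=2
--             continue
--         elif arr[i - 1] < arr[i] and arr[i] < arr[i + 1]:
--             maxprofit +=1
--     return maxprofit
-- ===== SOURCE B (Python) =====
-- def sumofBooty(arr):
--     n = len(arr)
--     if n < 3:
--         return 0
--     # suffix minima: smin[i] = min(arr[i:])
--     rev = []
--     m = None
--     for x in reversed(arr):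
--         m = x if m is None or x < m else m
--         rev.append(m)
--     smin = rev[::-1]
--     total = 0
--     mx = arr[0]
--     for i in range(1, n - 1):
--         a = arr[i]
--         if mx < a and a < smin[i + 1]:
--             total += 2
--         elif arr[i - 1] < a < arr[i + 1]:
--             total += 1
--         if mx < a:
--             mx = a
--     return total
-- ===== Notes on version B (the rewrite author's own statement) =====
-- stated objective: simpler
-- what changed: Replaces A's two monotonic-stack passes (NGL/NSR) that mark elements greater than everything left and smaller than everything right with a one-pass suffix-minima table plus a running prefix maximum carried through the single scoring loop.
import Mathlib
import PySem

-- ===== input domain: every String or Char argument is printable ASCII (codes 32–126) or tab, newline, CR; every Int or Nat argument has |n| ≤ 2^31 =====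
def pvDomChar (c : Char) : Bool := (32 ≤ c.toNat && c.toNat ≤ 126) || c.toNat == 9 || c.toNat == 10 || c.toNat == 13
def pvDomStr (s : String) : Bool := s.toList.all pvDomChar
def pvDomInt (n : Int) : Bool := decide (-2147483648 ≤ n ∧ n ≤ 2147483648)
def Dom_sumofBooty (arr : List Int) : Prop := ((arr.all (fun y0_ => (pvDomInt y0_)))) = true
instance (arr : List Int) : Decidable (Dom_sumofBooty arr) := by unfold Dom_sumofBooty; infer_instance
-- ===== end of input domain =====

-- B replaces A's two monotonic-stack passes (NGL/NSR) by a suffix-minima table plus a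
-- running prefix maximum (objective: simpler; measured constant-factor speedup, same O(n)).

-- ===== PORT A =====
-- the inner `while stack and arr[stack[-1]] >= arr[i]` of NSR; the stack is kept head = top
def nsrWhile (arr : List Int) : List Nat → List Bool → Nat → List Nat × List Bool
  | [], t, _ => ([], t)
  | idx :: rest, t, i =>
    if arr.getD i 0 ≤ arr.getD idx 0 then nsrWhile arr rest (t.set idx false) i
    else (idx :: rest, t)

-- the `for i in range(0, n)` loop of NSR
def nsrLoop (arr : List Int) (n : Nat) (s : List Nat) (t : List Bool) (i : Nat) : List Bool :=
  if h : i < n then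
    let p := nsrWhile arr s t i
    nsrLoop arr n (i :: p.1) p.2 (i + 1)
  else t
termination_by n - i

def NSR (arr : List Int) (twoRes : List Bool) : List Bool :=
  nsrLoop arr arr.length [] twoRes 0

-- the inner `while stack and arr[stack[-1]] <= arr[i]` of NGL
def nglWhile (arr : List Int) : List Nat → List Bool → Nat → List Nat × List Bool
  | [], t, _ => ([], t)
  | idx :: rest, t, i =>
    if arr.getD idx 0 ≤ arr.getD i 0 then nglWhile arr rest (t.set idx false) i
    else (idx :: rest, t)

-- the `for i in range(n-1, -1, -1)` loop of NGL; argument i+1 means current index i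
def nglLoop (arr : List Int) (s : List Nat) (t : List Bool) : Nat → List Bool
  | 0 => t
  | i + 1 =>
    let p := nglWhile arr s t i
    nglLoop arr (i :: p.1) p.2 i

def NGL (arr : List Int) (twoRes : List Bool) : List Bool :=
  nglLoop arr [] twoRes arr.length

def sumofBooty (arr : List Int) : Int :=
  let n := arr.length
  let two := NSR arr (NGL arr (List.replicate n true))
  (List.range' 1 (n - 2)).foldl (fun acc i =>
    if two.getD i false then acc + 2
    else if arr.getD (i - 1) 0 < arr.getD i 0 ∧ arr.getD i 0 < arr.getD (i + 1) 0 then acc + 1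
    else acc) 0

-- ===== PORT B =====
-- Source B builds the running minima over reversed(arr) by append-then-reverse; consing to the
-- front while folding over the reversed list builds the same list.
def suffMins (xs : List Int) : List Int :=
  xs.reverse.foldl (fun acc x =>
    match acc with
    | [] => [x]
    | m :: _ => min x m :: acc) []

def sumofBooty_alt (arr : List Int) : Int :=
  let n := arr.length
  if n < 3 then 0
  else
    let smin := suffMins arr
    ((List.range' 1 (n - 2)).foldl (fun (st : Int × Int) i =>
      let a := arr.getD i 0
      let total :=
        if st.2 < a ∧ a < smin.getD (i + 1) 0 then st.1 + 2
        else if arr.getD (i - 1) 0 < a ∧ a < arr.getD (i + 1) 0 then st.1 + 1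
        else st.1
      (total, if st.2 < a then a else st.2)) (0, arr.getD 0 0)).1

-- ===== PRECONDITION & SPEC =====
def Spec_sumofBooty (arr : List Int) (out : Int) : Prop := out = sumofBooty_alt arr
instance (arr : List Int) (out : Int) : Decidable (Spec_sumofBooty arr out) := by unfold Spec_sumofBooty; infer_instance

-- ===== CLAIM (what is proved, stated in full; the proofs are below) =====
def Claim_equal_sumofBooty : Prop := ∀ (arr : List Int), Dom_sumofBooty arr → Spec_sumofBooty arr (sumofBooty arr)

-- ===== LEMMAS AND PROOFS =====

lemma getD_set_false (t : List Bool) (a j : Nat) :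
    (t.set a false).getD j false = if j = a then false else t.getD j false := by
  rcases eq_or_ne j a with rfl | h
  · simp only [List.getD]
    rcases lt_or_ge j t.length with hl | hl
    · rw [List.getElem?_set_self (by simpa using hl)]; simp
    · rw [List.set_eq_of_length_le hl]
      simp [List.getElem?_eq_none (by simpa using hl)]
  · simp [List.getD, List.getElem?_set_ne h.symm, h]

-- nsrWhile pops exactly the stacked indices whose value is ≥ arr[i]
lemma nsrWhile_spec (arr : List Int) (i : Nat) (s : List Nat) (t : List Bool)
    (hp : List.Pairwise (fun a b => b < a ∧ arr.getD b 0 < arr.getD a 0) s) :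
    (nsrWhile arr s t i).1 = s.filter (fun j => decide (arr.getD j 0 < arr.getD i 0)) ∧
    ∀ j, (nsrWhile arr s t i).2.getD j false =
      if j ∈ s ∧ arr.getD i 0 ≤ arr.getD j 0 then false else t.getD j false := by
  induction s generalizing t with
  | nil => simp [nsrWhile]
  | cons idx rest ih =>
    rcases List.pairwise_cons.1 hp with ⟨hhead, htail⟩
    by_cases hc : arr.getD i 0 ≤ arr.getD idx 0
    · have := ih (t.set idx false) htail
      rw [nsrWhile, if_pos hc]
      refine ⟨?_, ?_⟩
      · rw [this.1, List.filter_cons]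
        rw [if_neg (by simpa using not_lt.2 hc)]
      · intro j
        rw [this.2 j, getD_set_false]
        by_cases hj : j = idx
        · subst hj
          split_ifs with h1 h2 h3 <;> simp_all
        · rw [if_neg hj]
          simp only [List.mem_cons, hj, false_or]
    · rw [nsrWhile, if_neg hc]
      rw [not_le] at hc
      refine ⟨?_, ?_⟩
      · rw [List.filter_cons]
        simp only [hc, decide_true, if_pos]
        rw [List.filter_eq_self.2 ?_]
        intro a ha
        exact decide_eq_true ((hhead a ha).2.trans hc)
      · intro j
        rw [if_neg]
        rintro ⟨hmem, hge⟩
        rcases List.mem_cons.1 hmem with rfl | hmem'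
        · omega
        · exact absurd ((hhead j hmem').2.trans hc) (not_lt.2 hge)

-- invariant of NSR's main loop
lemma nsrLoop_spec (arr : List Int) (n : Nat) (init : List Bool) :
    ∀ (d i : Nat) (s : List Nat) (t : List Bool), n - i = d → i ≤ n →
    List.Pairwise (fun a b => b < a ∧ arr.getD b 0 < arr.getD a 0) s →
    (∀ j ∈ s, j < i) →
    (∀ j, j < i → (j ∈ s ↔ ∀ k, k < i → j < k → arr.getD j 0 < arr.getD k 0)) →
    (∀ j, t.getD j false = (init.getD j false && decide (∀ k, k < i → j < k → arr.getD j 0 < arr.getD k 0))) →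
    ∀ j, (nsrLoop arr n s t i).getD j false =
      (init.getD j false && decide (∀ k, k < n → j < k → arr.getD j 0 < arr.getD k 0)) := by
  intro d
  induction d with
  | zero =>
    intro i s t hd hle hp hbnd hmem ht j
    have hin : i = n := by omega
    subst hin
    rw [nsrLoop, dif_neg (by omega)]
    exact ht j
  | succ d ih =>
    intro i s t hd hle hp hbnd hmem ht j
    have hin : i < n := by omega
    rw [nsrLoop, dif_pos hin]
    obtain ⟨hs1, hs2⟩ := nsrWhile_spec arr i s t hp
    set p := nsrWhile arr s t i with hpdef
    apply ih (i + 1) _ _ (by omega) (by omega)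
    · -- pairwise of i :: p.1
      rw [hs1]
      refine List.pairwise_cons.2 ⟨?_, hp.filter _⟩
      intro b hb
      rcases List.mem_filter.1 hb with ⟨hbs, hbv⟩
      exact ⟨hbnd b hbs, by simpa using hbv⟩
    · -- bounds
      intro j' hj'
      rcases List.mem_cons.1 hj' with rfl | h'
      · omega
      · rw [hs1] at h'
        exact Nat.lt_succ_of_lt (hbnd j' (List.mem_filter.1 h').1)
    · -- membership
      intro j' hj'
      rw [hs1]
      by_cases hji : j' = i
      · subst hji
        simp only [List.mem_cons, true_or, true_iff]
        intro k hk1 hk2; omega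
      · have hj'i : j' < i := by omega
        simp only [List.mem_cons, hji, false_or, List.mem_filter]
        rw [hmem j' hj'i]
        constructor
        · rintro ⟨hall, hlt⟩ k hk1 hk2
          by_cases hki : k = i
          · subst hki; simpa using hlt
          · exact hall k (by omega) hk2
        · intro hall
          exact ⟨fun k hk1 hk2 => hall k (by omega) hk2,
            by simpa using hall i (by omega) hj'i⟩
    · -- t values
      intro j'
      rw [hs2 j']
      by_cases hpop : j' ∈ s ∧ arr.getD i 0 ≤ arr.getD j' 0
      · rw [if_pos hpop]
        have hj'i : j' < i := hbnd j' hpop.1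
        have : ¬ (∀ k, k < i + 1 → j' < k → arr.getD j' 0 < arr.getD k 0) := by
          intro hall
          exact absurd (hall i (by omega) hj'i) (not_lt.2 hpop.2)
        rw [decide_eq_false this, Bool.and_false]
      · rw [if_neg hpop, ht j']
        by_cases hj'i : j' < i
        · by_cases hjs : j' ∈ s
          · have hlt : arr.getD j' 0 < arr.getD i 0 := by
              rcases not_and_or.1 hpop with h' | h'
              · exact absurd hjs h'
              · omega
            have hold : ∀ k, k < i → j' < k → arr.getD j' 0 < arr.getD k 0 := (hmem j' hj'i).1 hjs
            have hnew : ∀ k, k < i + 1 → j' < k → arr.getD j' 0 < arr.getD k 0 := by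
              intro k hk1 hk2
              by_cases hki : k = i
              · subst hki; exact hlt
              · exact hold k (by omega) hk2
            rw [decide_eq_true hold, decide_eq_true hnew]
          · have hold : ¬ ∀ k, k < i → j' < k → arr.getD j' 0 < arr.getD k 0 := by
              intro h'; exact hjs ((hmem j' hj'i).2 h')
            have hnew : ¬ ∀ k, k < i + 1 → j' < k → arr.getD j' 0 < arr.getD k 0 := by
              intro h'; exact hold fun k hk1 hk2 => h' k (by omega) hk2
            rw [decide_eq_false hold, decide_eq_false hnew]
        · have hold : ∀ k, k < i → j' < k → arr.getD j' 0 < arr.getD k 0 := by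
            intro k hk1 hk2; omega
          have hnew : ∀ k, k < i + 1 → j' < k → arr.getD j' 0 < arr.getD k 0 := by
            intro k hk1 hk2; omega
          rw [decide_eq_true hold, decide_eq_true hnew]

lemma NSR_spec (arr : List Int) (init : List Bool) (j : Nat) :
    (NSR arr init).getD j false =
      (init.getD j false && decide (∀ k, k < arr.length → j < k → arr.getD j 0 < arr.getD k 0)) := by
  refine nsrLoop_spec arr arr.length init (arr.length - 0) 0 [] init rfl (by omega)
    (by simp) (by simp) (by simp) ?_ j
  intro j'
  have : ∀ k, k < 0 → j' < k → arr.getD j' 0 < arr.getD k 0 := by omega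
  rw [decide_eq_true this, Bool.and_true]

-- nglWhile pops exactly the stacked indices whose value is ≤ arr[i]
lemma nglWhile_spec (arr : List Int) (i : Nat) (s : List Nat) (t : List Bool)
    (hp : List.Pairwise (fun a b => a < b ∧ arr.getD a 0 < arr.getD b 0) s) :
    (nglWhile arr s t i).1 = s.filter (fun j => decide (arr.getD i 0 < arr.getD j 0)) ∧
    ∀ j, (nglWhile arr s t i).2.getD j false =
      if j ∈ s ∧ arr.getD j 0 ≤ arr.getD i 0 then false else t.getD j false := by
  induction s generalizing t with
  | nil => simp [nglWhile]
  | cons idx rest ih =>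
    rcases List.pairwise_cons.1 hp with ⟨hhead, htail⟩
    by_cases hc : arr.getD idx 0 ≤ arr.getD i 0
    · have := ih (t.set idx false) htail
      rw [nglWhile, if_pos hc]
      refine ⟨?_, ?_⟩
      · rw [this.1, List.filter_cons]
        rw [if_neg (by simpa using not_lt.2 hc)]
      · intro j
        rw [this.2 j, getD_set_false]
        by_cases hj : j = idx
        · subst hj
          split_ifs with h1 h2 h3 <;> simp_all
        · rw [if_neg hj]
          simp only [List.mem_cons, hj, false_or]
    · rw [nglWhile, if_neg hc]
      rw [not_le] at hc
      refine ⟨?_, ?_⟩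
      · rw [List.filter_cons]
        simp only [hc, decide_true, if_pos]
        rw [List.filter_eq_self.2 ?_]
        intro a ha
        exact decide_eq_true (hc.trans (hhead a ha).2)
      · intro j
        rw [if_neg]
        rintro ⟨hmem, hge⟩
        rcases List.mem_cons.1 hmem with rfl | hmem'
        · omega
        · exact absurd (hc.trans (hhead j hmem').2) (not_lt.2 hge)

-- invariant of NGL's main loop (indices ≥ i already processed)
lemma nglLoop_spec (arr : List Int) (i0 : Nat) (init : List Bool) :
    ∀ (i : Nat) (s : List Nat) (t : List Bool), i ≤ i0 →
    List.Pairwise (fun a b => a < b ∧ arr.getD a 0 < arr.getD b 0) s →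
    (∀ j ∈ s, i ≤ j ∧ j < i0) →
    (∀ j, i ≤ j → j < i0 → (j ∈ s ↔ ∀ k, i ≤ k → k < j → arr.getD k 0 < arr.getD j 0)) →
    (∀ j, j < i0 → t.getD j false = (init.getD j false && decide (∀ k, i ≤ k → k < j → arr.getD k 0 < arr.getD j 0))) →
    ∀ j, j < i0 → (nglLoop arr s t i).getD j false =
      (init.getD j false && decide (∀ k, k < j → arr.getD k 0 < arr.getD j 0)) := by
  intro i
  induction i with
  | zero =>
    intro s t hle hp hbnd hmem ht j hj
    rw [nglLoop, ht j hj]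
    congr 1
    exact decide_eq_decide.mpr ⟨fun h k hk => h k (Nat.zero_le k) hk, fun h k _ hk => h k hk⟩
  | succ i ih =>
    intro s t hle hp hbnd hmem ht j hj
    rw [nglLoop]
    obtain ⟨hs1, hs2⟩ := nglWhile_spec arr i s t hp
    set p := nglWhile arr s t i with hpdef
    refine ih (i :: p.1) p.2 (by omega) ?_ ?_ ?_ ?_ j hj
    · rw [hs1]
      refine List.pairwise_cons.2 ⟨?_, hp.filter _⟩
      intro b hb
      rcases List.mem_filter.1 hb with ⟨hbs, hbv⟩
      exact ⟨by have := (hbnd b hbs).1; omega, by simpa using hbv⟩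
    · intro j' hj'
      rcases List.mem_cons.1 hj' with rfl | h'
      · exact ⟨le_refl _, by omega⟩
      · rw [hs1] at h'
        have := hbnd j' (List.mem_filter.1 h').1
        exact ⟨by omega, this.2⟩
    · intro j' hj'1 hj'2
      rw [hs1]
      by_cases hji : j' = i
      · subst hji
        simp only [List.mem_cons, true_or, true_iff]
        intro k hk1 hk2; omega
      · have hij' : i < j' := by omega
        simp only [List.mem_cons, hji, false_or, List.mem_filter]
        rw [hmem j' (by omega) hj'2]
        constructor
        · rintro ⟨hall, hlt⟩ k hk1 hk2
          by_cases hki : k = i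
          · subst hki; simpa using hlt
          · exact hall k (by omega) hk2
        · intro hall
          exact ⟨fun k hk1 hk2 => hall k (by omega) hk2,
            by simpa using hall i (le_refl _) hij'⟩
    · intro j' hj'
      rw [hs2 j']
      by_cases hpop : j' ∈ s ∧ arr.getD j' 0 ≤ arr.getD i 0
      · rw [if_pos hpop]
        have hij' : i < j' := by have := (hbnd j' hpop.1).1; omega
        have hnot : ¬ (∀ k, i ≤ k → k < j' → arr.getD k 0 < arr.getD j' 0) := by
          intro hall
          exact absurd (hall i (le_refl _) hij') (not_lt.2 hpop.2)
        rw [decide_eq_false hnot, Bool.and_false]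
      · rw [if_neg hpop, ht j' hj']
        by_cases hij' : i < j'
        · by_cases hjs : j' ∈ s
          · have hlt : arr.getD i 0 < arr.getD j' 0 := by
              rcases not_and_or.1 hpop with h' | h'
              · exact absurd hjs h'
              · omega
            have hold : ∀ k, i + 1 ≤ k → k < j' → arr.getD k 0 < arr.getD j' 0 :=
              (hmem j' (by omega) hj').1 hjs
            have hnew : ∀ k, i ≤ k → k < j' → arr.getD k 0 < arr.getD j' 0 := by
              intro k hk1 hk2
              by_cases hki : k = i
              · subst hki; exact hlt
              · exact hold k (by omega) hk2
            rw [decide_eq_true hold, decide_eq_true hnew]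
          · have hold : ¬ ∀ k, i + 1 ≤ k → k < j' → arr.getD k 0 < arr.getD j' 0 := by
              intro h'; exact hjs ((hmem j' (by omega) hj').2 h')
            have hnew : ¬ ∀ k, i ≤ k → k < j' → arr.getD k 0 < arr.getD j' 0 := by
              intro h'; exact hold fun k hk1 hk2 => h' k (by omega) hk2
            rw [decide_eq_false hold, decide_eq_false hnew]
        · have hold : ∀ k, i + 1 ≤ k → k < j' → arr.getD k 0 < arr.getD j' 0 := by
            intro k hk1 hk2; omega
          have hnew : ∀ k, i ≤ k → k < j' → arr.getD k 0 < arr.getD j' 0 := by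
            intro k hk1 hk2; omega
          rw [decide_eq_true hold, decide_eq_true hnew]

lemma NGL_spec (arr : List Int) (init : List Bool) (j : Nat) (hj : j < arr.length) :
    (NGL arr init).getD j false =
      (init.getD j false && decide (∀ k, k < j → arr.getD k 0 < arr.getD j 0)) := by
  refine nglLoop_spec arr arr.length init arr.length [] init (le_refl _)
    (by simp) (by simp) (by intro j' h1 h2; omega) ?_ j hj
  intro j' hj'
  have : ∀ k, arr.length ≤ k → k < j' → arr.getD k 0 < arr.getD j' 0 := by
    intro k hk1 hk2; omega
  rw [decide_eq_true this, Bool.and_true]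

lemma suffMins_cons (x : Int) (xs : List Int) :
    suffMins (x :: xs) = (match suffMins xs with
      | [] => [x]
      | m :: ms => min x m :: m :: ms) := by
  unfold suffMins
  rw [List.reverse_cons, List.foldl_append]
  cases h : (xs.reverse.foldl (fun acc x =>
    match acc with
    | [] => [x]
    | m :: _ => min x m :: acc) ([] : List Int)) with
  | nil => simp
  | cons m ms => simp

lemma suffMins_length (xs : List Int) : (suffMins xs).length = xs.length := by
  induction xs with
  | nil => rfl
  | cons x xs ih =>
    rw [suffMins_cons]
    cases h : suffMins xs with
    | nil => rw [h] at ih; simp_all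
    | cons m ms => rw [h] at ih; simp_all

-- (suffMins xs).getD j 0 is the minimum of xs.drop j, characterised by comparison
lemma suffMins_getD_lt (xs : List Int) : ∀ j, j < xs.length → ∀ a : Int,
    (a < (suffMins xs).getD j 0 ↔ ∀ k, j ≤ k → k < xs.length → a < xs.getD k 0) := by
  induction xs with
  | nil => intro j hj; simp at hj
  | cons x xs ih =>
    intro j hj a
    rw [suffMins_cons]
    cases h : suffMins xs with
    | nil =>
      have hxs : xs = [] := by
        have := suffMins_length xs; rw [h] at this; simpa using (List.length_eq_zero_iff.1 this.symm)
      subst hxs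
      have hj0 : j = 0 := by simpa using hj
      subst hj0
      constructor
      · intro hlt k _ hk
        simp only [List.length_cons, List.length_nil] at hk
        have : k = 0 := by omega
        subst this; simpa using hlt
      · intro hall
        simpa using hall 0 (le_refl _) (by simp)
    | cons m ms =>
      have hlen : 0 < xs.length := by
        have := suffMins_length xs; rw [h] at this; simp at this; omega
      cases j with
      | zero =>
        have h0 : (suffMins xs).getD 0 0 = m := by rw [h]; rfl
        have hih := ih 0 hlen a
        rw [h0] at hih
        simp only [List.getD_cons_zero, lt_min_iff]
        constructor
        · rintro ⟨hx, hm⟩ k _ hk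
          cases k with
          | zero => simpa using hx
          | succ k' =>
            simp only [List.getD_cons_succ]
            exact (hih.1 hm) k' (Nat.zero_le _) (by simpa using hk)
        · intro hall
          refine ⟨by simpa using hall 0 (le_refl _) (by simp), hih.2 ?_⟩
          intro k _ hk
          simpa using hall (k+1) (Nat.zero_le _) (by simpa using hk)
      | succ j' =>
        have hj' : j' < xs.length := by simpa using hj
        have htail : ((min x m :: m :: ms) : List Int).getD (j'+1) 0 = (suffMins xs).getD j' 0 := by
          rw [h]; rfl
        rw [htail, ih j' hj' a]
        constructor
        · intro hall k hk1 hk2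
          cases k with
          | zero => omega
          | succ k' =>
            simp only [List.getD_cons_succ]
            exact hall k' (by omega) (by simpa using hk2)
        · intro hall k hk1 hk2
          have := hall (k+1) (by omega) (by simpa using hk2)
          simpa using this

-- the prefix maximum maintained by B's running mx
def pmax (arr : List Int) : Nat → Int
  | 0 => arr.getD 0 0
  | m + 1 => if pmax arr m < arr.getD (m + 1) 0 then arr.getD (m + 1) 0 else pmax arr m

lemma pmax_lt_iff (arr : List Int) : ∀ m (a : Int), (pmax arr m < a ↔ ∀ k, k ≤ m → arr.getD k 0 < a) := by
  intro m
  induction m with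
  | zero =>
    intro a
    simp only [pmax]
    constructor
    · intro h k hk; rw [Nat.le_zero.1 hk]; exact h
    · intro h; exact h 0 (le_refl _)
  | succ m ih =>
    intro a
    have hmax : pmax arr (m + 1) = max (pmax arr m) (arr.getD (m + 1) 0) := by
      rw [pmax]; split_ifs with hc <;> omega
    rw [hmax, max_lt_iff, ih]
    constructor
    · rintro ⟨h1, h2⟩ k hk
      by_cases hk' : k = m + 1
      · subst hk'; exact h2
      · exact h1 k (by omega)
    · intro h
      exact ⟨fun k hk => h k (by omega), h (m + 1) (le_refl _)⟩

-- the per-index score both programs award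
def contrib (arr : List Int) (n i : Nat) : Int :=
  if (∀ k, k < i → arr.getD k 0 < arr.getD i 0) ∧ (∀ k, k < n → i < k → arr.getD i 0 < arr.getD k 0) then 2
  else if arr.getD (i - 1) 0 < arr.getD i 0 ∧ arr.getD i 0 < arr.getD (i + 1) 0 then 1
  else 0

-- A's fold sums contrib, by the stack characterisations
lemma afold (arr : List Int) :
    sumofBooty arr =
      (List.range' 1 (arr.length - 2)).foldl (fun acc i => acc + contrib arr arr.length i) 0 := by
  unfold sumofBooty
  apply PySem.List.foldl_congr_mem
  intro acc i hi
  rcases List.mem_range'_1.1 hi with ⟨h1, h2⟩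
  have hin : i < arr.length := by omega
  have htwo : (NSR arr (NGL arr (List.replicate arr.length true))).getD i false =
      (decide (∀ k, k < i → arr.getD k 0 < arr.getD i 0) &&
       decide (∀ k, k < arr.length → i < k → arr.getD i 0 < arr.getD k 0)) := by
    rw [NSR_spec, NGL_spec arr _ i hin]
    have : (List.replicate arr.length true).getD i false = true := by
      simp [List.getD, hin]
    rw [this, Bool.true_and]
  rw [htwo]
  unfold contrib
  by_cases hA : (∀ k, k < i → arr.getD k 0 < arr.getD i 0)
  · by_cases hB : (∀ k, k < arr.length → i < k → arr.getD i 0 < arr.getD k 0)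
    · rw [decide_eq_true hA, decide_eq_true hB]
      simp only [Bool.and_self, if_pos trivial]
      rw [if_pos ⟨hA, hB⟩]
    · rw [decide_eq_true hA, decide_eq_false hB, Bool.and_false]
      rw [if_neg (by simp : ¬ (false = true))]
      rw [if_neg (fun h : _ ∧ (∀ k, k < arr.length → i < k → arr.getD i 0 < arr.getD k 0) => hB h.2)]
      split_ifs <;> ring
  · rw [decide_eq_false hA, Bool.false_and]
    rw [if_neg (by simp : ¬ (false = true))]
    rw [if_neg (fun h : (∀ k, k < i → arr.getD k 0 < arr.getD i 0) ∧ _ => hA h.1)]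
    split_ifs <;> ring

-- B's fold sums contrib while carrying the prefix maximum
lemma bfold (arr : List Int) (h3 : 3 ≤ arr.length) :
    ∀ m, m ≤ arr.length - 2 →
    (List.range' 1 m).foldl (fun (st : Int × Int) i =>
      let a := arr.getD i 0
      let total :=
        if st.2 < a ∧ a < (suffMins arr).getD (i + 1) 0 then st.1 + 2
        else if arr.getD (i - 1) 0 < a ∧ a < arr.getD (i + 1) 0 then st.1 + 1
        else st.1
      (total, if st.2 < a then a else st.2)) (0, arr.getD 0 0)
    = ((List.range' 1 m).foldl (fun acc i => acc + contrib arr arr.length i) 0, pmax arr m) := by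
  intro m
  induction m with
  | zero => intro _; rfl
  | succ m ih =>
    intro hm
    rw [List.range'_1_concat, List.foldl_append, List.foldl_append, ih (by omega)]
    simp only [List.foldl_cons, List.foldl_nil]
    have hidx : 1 + m = m + 1 := by omega
    rw [hidx]
    have hc1 : (pmax arr m < arr.getD (m + 1) 0 ∧
        arr.getD (m + 1) 0 < (suffMins arr).getD (m + 1 + 1) 0) ↔
        ((∀ k, k < m + 1 → arr.getD k 0 < arr.getD (m + 1) 0) ∧
         (∀ k, k < arr.length → m + 1 < k → arr.getD (m + 1) 0 < arr.getD k 0)) := by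
      have e1 : pmax arr m < arr.getD (m + 1) 0 ↔
          ∀ k, k < m + 1 → arr.getD k 0 < arr.getD (m + 1) 0 := by
        rw [pmax_lt_iff]
        exact ⟨fun h k hk => h k (by omega), fun h k hk => h k (by omega)⟩
      have hlt : m + 2 < arr.length := by omega
      have e2 : arr.getD (m + 1) 0 < (suffMins arr).getD (m + 2) 0 ↔
          ∀ k, k < arr.length → m + 1 < k → arr.getD (m + 1) 0 < arr.getD k 0 := by
        rw [suffMins_getD_lt arr (m + 2) hlt]
        constructor
        · intro h k hk1 hk2; exact h k (by omega) hk1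
        · intro h k hk1 hk2; exact h k hk2 (by omega)
      exact and_congr e1 e2
    refine Prod.ext ?_ ?_
    · show (if _ ∧ _ then _ + 2 else if _ then _ + 1 else _) = _ + contrib arr arr.length (m + 1)
      rw [if_congr hc1 rfl rfl]
      unfold contrib
      split_ifs <;> ring
    · show (if pmax arr m < arr.getD (m + 1) 0 then arr.getD (m + 1) 0 else pmax arr m) = pmax arr (m + 1)
      rw [pmax]

theorem AB_eq (arr : List Int) : sumofBooty arr = sumofBooty_alt arr := by
  by_cases h3 : arr.length < 3
  · unfold sumofBooty sumofBooty_alt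
    rw [if_pos h3]
    have h0 : arr.length - 2 = 0 := by omega
    show (List.range' 1 (arr.length - 2)).foldl _ 0 = 0
    rw [h0]
    rfl
  · have h3' : 3 ≤ arr.length := not_lt.1 h3
    unfold sumofBooty_alt
    rw [if_neg h3]
    rw [afold]
    show _ = ((List.range' 1 (arr.length - 2)).foldl (fun (st : Int × Int) i =>
      let a := arr.getD i 0
      let total :=
        if st.2 < a ∧ a < (suffMins arr).getD (i + 1) 0 then st.1 + 2
        else if arr.getD (i - 1) 0 < a ∧ a < arr.getD (i + 1) 0 then st.1 + 1
        else st.1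
      (total, if st.2 < a then a else st.2)) (0, arr.getD 0 0)).1
    rw [bfold arr h3' (arr.length - 2) (le_refl _)]

-- ===== VERDICT (by name: the statement is the Claim_ definition above) =====
theorem sumofBooty_spec : Claim_equal_sumofBooty := by
  intro arr _
  unfold Spec_sumofBooty
  exact AB_eq arr
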